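-- pv_equiv track=rewrite | github.com/phc5403/Algorithm | Python3/프로그래머스/0/181932. 코드 처리하기/코드 처리하기.py | solution
-- ===== SOURCE A (Python) =====
-- def solution(code):
--     mode = 0  # 초기 mode는 0
--     ret = []  # 문자열을 저장할 리스트
--
--     for idx, char in enumerate(code):
--         if char == "1":
--             mode = 1 - mode  # mode 전환
--         else:
--             if (mode == 0 and idx % 2 == 0) or (mode == 1 and idx % 2 == 1):
--                 ret.append(char)  # 조건 만족 시 추가
--
--     return ''.join(ret) if ret else "EMPTY"
-- ===== SOURCE B (Python) =====
-- def solution(code):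
--     # Phase 1: prefix count of '1's strictly before each position.
--     prefix = []
--     ones = 0
--     for c in code:
--         prefix.append(ones)
--         ones += c == "1"
--     # Phase 2: keep chars whose pre-computed mode (parity of '1's before) matches idx parity.
--     kept = [c for ones_before, (i, c) in zip(prefix, enumerate(code))
--             if c != "1" and ones_before % 2 == i % 2]
--     return ''.join(kept) if kept else "EMPTY"
-- ===== Notes on version B (the rewrite author's own statement) =====
-- stated objective: alternative
-- what changed: Replaced the fused single-loop mode state machine with a two-phase shape: first build a prefix table of '1'-counts before each index, then a single comprehension keeps code[i] when it is not '1' and the prefix parity equals i % 2.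
import Mathlib
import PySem

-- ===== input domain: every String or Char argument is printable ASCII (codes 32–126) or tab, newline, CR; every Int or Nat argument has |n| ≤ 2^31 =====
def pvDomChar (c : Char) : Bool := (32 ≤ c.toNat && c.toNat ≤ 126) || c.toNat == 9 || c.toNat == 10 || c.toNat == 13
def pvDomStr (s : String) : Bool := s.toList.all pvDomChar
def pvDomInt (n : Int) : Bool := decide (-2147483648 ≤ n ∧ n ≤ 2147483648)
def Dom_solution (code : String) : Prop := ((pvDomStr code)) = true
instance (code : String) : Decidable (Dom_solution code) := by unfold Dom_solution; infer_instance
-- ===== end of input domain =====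

-- B replaces A's fused one-loop mode state machine by a prefix-parity table plus a filtering pass (alternative decomposition, same cost).

-- ===== PORT A =====
-- the body of A's for-loop (mode flip / conditional append), as a named step function
def stepA (st : Int × List Char) (p : Int × Char) : Int × List Char :=
  if p.2 = '1' then (1 - st.1, st.2)
  else if (st.1 = 0 ∧ p.1 % 2 = 0) ∨ (st.1 = 1 ∧ p.1 % 2 = 1) then (st.1, st.2 ++ [p.2])
  else st

def solution (code : String) : String :=
  let r := (PySem.List.enumerate code.toList).foldl stepA ((0 : Int), ([] : List Char))
  if r.2 = [] then "EMPTY" else String.mk r.2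

-- ===== PORT B =====
def solution_alt (code : String) : String :=
  let pr := (code.toList.foldl
    (fun (st : List Int × Int) c =>
      (st.1 ++ [st.2], st.2 + (if c = '1' then 1 else 0))) (([] : List Int), (0 : Int))).1
  let kept := ((pr.zip (PySem.List.enumerate code.toList)).filter
      (fun q => q.2.2 ≠ '1' ∧ q.1 % 2 = q.2.1 % 2)).map (fun q => q.2.2)
  if kept = [] then "EMPTY" else String.mk kept

-- ===== PRECONDITION & SPEC =====
def Spec_solution (code : String) (out : String) : Prop := out = solution_alt code
instance (code : String) (out : String) : Decidable (Spec_solution code out) := by unfold Spec_solution; infer_instance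

-- ===== CLAIM (what is proved, stated in full; the proofs are below) =====
def Claim_equal_solution : Prop := ∀ (code : String), Dom_solution code → Spec_solution code (solution code)

-- ===== LEMMAS AND PROOFS =====

-- the common recursive description of the kept characters
def keptRec : List Char → Int → Int → List Char
  | [], _, _ => []
  | c :: t, n, o =>
    if c = '1' then keptRec t (n + 1) (o + 1)
    else if o % 2 = n % 2 then c :: keptRec t (n + 1) o
    else keptRec t (n + 1) o

-- the prefix-ones list built by B's first loop
def prefList : List Char → Int → List Int
  | [], _ => []
  | c :: t, o => o :: prefList t (o + (if c = '1' then 1 else 0))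

theorem foldA_eq_keptRec (l : List Char) (n o : Int) (r : List Char)
    (hn : 0 ≤ n) (ho : 0 ≤ o) :
    ((PySem.List.enumerate l n).foldl stepA (o % 2, r)).2 = r ++ keptRec l n o := by
  induction l generalizing n o r with
  | nil => simp [PySem.List.enumerate_nil, keptRec]
  | cons c t ih =>
    rw [PySem.List.enumerate_cons, List.foldl_cons, keptRec]
    by_cases h1 : c = '1'
    · have hs : stepA (o % 2, r) (n, c) = ((o + 1) % 2, r) := by
        simp [stepA, h1, Prod.ext_iff]; omega
      rw [if_pos h1, hs]
      exact ih (n + 1) (o + 1) r (by omega) (by omega)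
    · rw [if_neg h1]
      by_cases hc : o % 2 = n % 2
      · have hs : stepA (o % 2, r) (n, c) = (o % 2, r ++ [c]) := by
          simp [stepA, h1, Prod.ext_iff]; omega
        rw [if_pos hc, hs, ih (n + 1) o (r ++ [c]) (by omega) ho, List.append_assoc]
        rfl
      · have hs : stepA (o % 2, r) (n, c) = (o % 2, r) := by
          simp [stepA, h1, Prod.ext_iff]; omega
        rw [if_neg hc, hs]
        exact ih (n + 1) o r (by omega) ho

theorem foldPre_eq (l : List Char) (o : Int) (p : List Int) :
    (l.foldl (fun (st : List Int × Int) c =>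
      (st.1 ++ [st.2], st.2 + (if c = '1' then 1 else 0))) (p, o)).1 = p ++ prefList l o := by
  induction l generalizing o p with
  | nil => simp [prefList]
  | cons c t ih => simp [prefList, ih]

theorem zipFilter_eq_keptRec (l : List Char) (n o : Int) :
    (((prefList l o).zip (PySem.List.enumerate l n)).filter
      (fun q => q.2.2 ≠ '1' ∧ q.1 % 2 = q.2.1 % 2)).map (fun q => q.2.2) = keptRec l n o := by
  induction l generalizing n o with
  | nil => simp [prefList, PySem.List.enumerate_nil, keptRec]
  | cons c t ih =>
    rw [PySem.List.enumerate_cons]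
    by_cases h1 : c = '1'
    · rw [keptRec, if_pos h1]
      rw [prefList, if_pos h1, List.zip_cons_cons,
        List.filter_cons_of_neg (by simp [h1])]
      exact ih (n + 1) (o + 1)
    · rw [keptRec, if_neg h1, prefList, if_neg h1, add_zero, List.zip_cons_cons]
      by_cases hc : o % 2 = n % 2
      · rw [if_pos hc, List.filter_cons_of_pos (by simp [h1, hc]), List.map_cons]
        rw [ih (n + 1) o]
      · rw [if_neg hc, List.filter_cons_of_neg (by simp [h1, hc])]
        exact ih (n + 1) o

-- ===== VERDICT (by name: the statement is the Claim_ definition above) =====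
theorem solution_spec : Claim_equal_solution := by
  intro code _
  unfold Spec_solution solution solution_alt
  have hA := foldA_eq_keptRec code.toList 0 0 [] le_rfl le_rfl
  simp only [show (0:Int) % 2 = 0 from rfl] at hA
  simp only [hA, foldPre_eq code.toList 0 [], List.nil_append,
    zipFilter_eq_keptRec code.toList 0 0]
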